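-- pv_equiv track=rewrite | github.com/crystal1017/tobaccowatcher_web | src/tobaccowatcher_web/utils.py | parse_ors
-- ===== SOURCE A (Python) =====
-- def parse_ors(words, connector='or'):
--     prev = ''
--     or_words = []
--     is_or = False
--     remove_these = []
--     for word in words:
--         # Parse out pairs connected by `connector`
--         if word.lower() == connector:
--             or_words.append(prev)
--             remove_these.append(prev)
--             remove_these.append(word)
--             is_or = True
--         elif is_or:
--             or_words.append(word)
--             remove_these.append(word)
--             is_or = False
--
--         prev = word
--
--     return or_words, remove_these
-- ===== SOURCE B (Python) =====
-- def parse_ors(words, connector='or'):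
--     ws = list(words)
--     or_words = []
--     remove_these = []
--     for prev, w, nxt in zip([''] + ws, ws, ws[1:] + [None]):
--         if w.lower() == connector:
--             or_words.append(prev)
--             remove_these.append(prev)
--             remove_these.append(w)
--             if nxt is not None and nxt.lower() != connector:
--                 or_words.append(nxt)
--                 remove_these.append(nxt)
--     return or_words, remove_these
-- ===== Notes on version B (the rewrite author's own statement) =====
-- stated objective: alternative
-- what changed: Replaces A's prev/is_or state machine with a single stateless pass over (previous, current, next) neighbor triples built by zip, emitting the connector's neighbors directly at the connector position.
import Mathlib
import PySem

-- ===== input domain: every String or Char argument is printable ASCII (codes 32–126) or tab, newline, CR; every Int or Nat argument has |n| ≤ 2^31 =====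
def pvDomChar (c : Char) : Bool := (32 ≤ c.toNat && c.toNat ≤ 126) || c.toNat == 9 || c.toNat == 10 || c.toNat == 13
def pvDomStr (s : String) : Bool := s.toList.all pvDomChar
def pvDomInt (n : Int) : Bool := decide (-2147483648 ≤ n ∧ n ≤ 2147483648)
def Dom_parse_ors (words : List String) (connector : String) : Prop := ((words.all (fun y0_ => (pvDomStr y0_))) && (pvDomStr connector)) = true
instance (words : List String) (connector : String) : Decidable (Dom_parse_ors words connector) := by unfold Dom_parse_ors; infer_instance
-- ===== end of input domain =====

-- B replaces A's prev/is_or state machine with one stateless pass over (prev, cur, next) neighbor triples (objective: alternative decomposition).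

-- ===== PORT A =====
-- loop body of A; state = (prev, or_words, is_or, remove_these), exactly A's loop variables
def parse_ors_step (connector : String)
    (st : String × List String × Bool × List String) (word : String) :
    String × List String × Bool × List String :=
  if PySem.Str.lower word = connector then
    (word, st.2.1 ++ [st.1], true, st.2.2.2 ++ [st.1, word])
  else if st.2.2.1 then
    (word, st.2.1 ++ [word], false, st.2.2.2 ++ [word])
  else
    (word, st.2.1, false, st.2.2.2)

def parse_ors (words : List String) (connector : String) : List String × List String :=
  let st := words.foldl (parse_ors_step connector) ("", [], false, [])
  (st.2.1, st.2.2.2)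

-- ===== PORT B =====
-- loop body of B over one (prev, w, nxt) triple
def parse_ors_alt_step (connector : String)
    (acc : List String × List String) (t : String × String × Option String) :
    List String × List String :=
  if PySem.Str.lower t.2.1 = connector then
    let acc1 := (acc.1 ++ [t.1], acc.2 ++ [t.1, t.2.1])
    match t.2.2 with
    | some n => if PySem.Str.lower n = connector then acc1 else (acc1.1 ++ [n], acc1.2 ++ [n])
    | none => acc1
  else acc

-- zip([''] + ws, ws, ws[1:] + [None]); ws[1:] on a list is ws.tail
def parse_ors_alt (words : List String) (connector : String) : List String × List String :=
  let ws := words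
  let triples := List.zip ("" :: ws) (List.zip ws (ws.tail.map Option.some ++ [none]))
  triples.foldl (parse_ors_alt_step connector) ([], [])

-- ===== PRECONDITION & SPEC =====
def Spec_parse_ors (words : List String) (connector : String) (out : List String × List String) : Prop := out = parse_ors_alt words connector
instance (words : List String) (connector : String) (out : List String × List String) : Decidable (Spec_parse_ors words connector out) := by unfold Spec_parse_ors; infer_instance

-- ===== CLAIM (what is proved, stated in full; the proofs are below) =====
def Claim_equal_parse_ors : Prop := ∀ (words : List String) (connector : String), Dom_parse_ors words connector → Spec_parse_ors words connector (parse_ors words connector)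

-- ===== LEMMAS AND PROOFS =====

-- recursive characterization of A's loop (prev, is_or as parameters)
def aspec (conn : String) : String → Bool → List String → List String × List String
  | _, _, [] => ([], [])
  | prev, isor, w :: rest =>
    if PySem.Str.lower w = conn then
      let t := aspec conn w true rest
      (prev :: t.1, prev :: w :: t.2)
    else if isor then
      let t := aspec conn w false rest
      (w :: t.1, w :: t.2)
    else aspec conn w false rest

-- the follower emitted by B right after a connector, given the remaining words
def nxtOf (conn : String) : List String → List String
  | [] => []
  | w :: _ => if PySem.Str.lower w = conn then [] else [w]

-- recursive characterization of B's loop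
def bspec (conn : String) : String → List String → List String × List String
  | _, [] => ([], [])
  | prev, w :: rest =>
    if PySem.Str.lower w = conn then
      let t := bspec conn w rest
      (prev :: (nxtOf conn rest ++ t.1), prev :: w :: (nxtOf conn rest ++ t.2))
    else bspec conn w rest

-- B's triple stream, recursively
def triples : String → List String → List (String × String × Option String)
  | _, [] => []
  | prev, w :: rest => (prev, w, rest.head?) :: triples w rest

lemma zip_eq_triples : ∀ (l : List String) (prev : String),
    List.zip (prev :: l) (List.zip l (l.tail.map Option.some ++ [none])) = triples prev l := by
  intro l
  induction l with
  | nil => intro prev; simp [triples]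
  | cons w rest ih =>
    intro prev
    cases rest with
    | nil => simp [triples]
    | cons r rest' =>
      have h := ih w
      simp only [List.tail_cons] at h ⊢
      simp [List.zip, triples, List.head?] at h ⊢
      exact h

lemma afold (conn : String) : ∀ (l : List String) (prev : String) (isor : Bool)
    (o r : List String),
    (l.foldl (parse_ors_step conn) (prev, o, isor, r)).2.1
      = o ++ (aspec conn prev isor l).1 ∧
    (l.foldl (parse_ors_step conn) (prev, o, isor, r)).2.2.2
      = r ++ (aspec conn prev isor l).2 := by
  intro l
  induction l with
  | nil => intro prev isor o r; simp [aspec]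
  | cons w rest ih =>
    intro prev isor o r
    by_cases h : PySem.Str.lower w = conn
    · have := ih w true (o ++ [prev]) (r ++ [prev, w])
      simp [parse_ors_step, aspec, h, this.1, this.2]
    · cases isor with
      | true =>
        have := ih w false (o ++ [w]) (r ++ [w])
        simp [parse_ors_step, aspec, h, this.1, this.2]
      | false =>
        have := ih w false o r
        simp [parse_ors_step, aspec, h, this.1, this.2]

lemma bfold (conn : String) : ∀ (l : List String) (prev : String) (o r : List String),
    (triples prev l).foldl (parse_ors_alt_step conn) (o, r)
      = (o ++ (bspec conn prev l).1, r ++ (bspec conn prev l).2) := by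
  intro l
  induction l with
  | nil => intro prev o r; simp [triples, bspec]
  | cons w rest ih =>
    intro prev o r
    simp only [triples, List.foldl_cons]
    by_cases h : PySem.Str.lower w = conn
    · cases rest with
      | nil =>
        rw [ih]
        simp [parse_ors_alt_step, bspec, h, nxtOf, List.head?]
      | cons n rest' =>
        by_cases hn : PySem.Str.lower n = conn
        · rw [show parse_ors_alt_step conn (o, r) (prev, w, (n :: rest').head?)
                = (o ++ [prev], r ++ [prev, w]) by
              simp [parse_ors_alt_step, h, hn, List.head?]]
          rw [ih]
          simp [bspec, h, hn, nxtOf]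
        · rw [show parse_ors_alt_step conn (o, r) (prev, w, (n :: rest').head?)
                = (o ++ [prev, n], r ++ [prev, w, n]) by
              simp [parse_ors_alt_step, h, hn, List.head?]]
          rw [ih]
          simp [bspec, h, hn, nxtOf]
    · rw [show parse_ors_alt_step conn (o, r) (prev, w, rest.head?) = (o, r) by
          simp [parse_ors_alt_step, h]]
      rw [ih]
      simp [bspec, h]

lemma aspec_eq_bspec (conn : String) : ∀ (l : List String) (prev : String),
    aspec conn prev false l = bspec conn prev l ∧
    aspec conn prev true l
      = (nxtOf conn l ++ (bspec conn prev l).1, nxtOf conn l ++ (bspec conn prev l).2) := by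
  intro l
  induction l with
  | nil => intro prev; simp [aspec, bspec, nxtOf]
  | cons w rest ih =>
    intro prev
    by_cases h : PySem.Str.lower w = conn
    · have hq : aspec conn prev false (w :: rest) = bspec conn prev (w :: rest) := by
        simp [aspec, bspec, h, (ih w).2]
      refine ⟨hq, ?_⟩
      have : aspec conn prev true (w :: rest) = aspec conn prev false (w :: rest) := by
        simp [aspec, h]
      rw [this, hq, nxtOf, if_pos h]
      simp
    · constructor
      · simp [aspec, bspec, h, (ih w).1]
      · simp [aspec, bspec, h, nxtOf, (ih w).1]

-- ===== VERDICT (by name: the statement is the Claim_ definition above) =====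
theorem parse_ors_spec : Claim_equal_parse_ors := by
  intro words connector _
  show parse_ors words connector = parse_ors_alt words connector
  have ha := afold connector words "" false [] []
  have hb := bfold connector words "" [] []
  have hab := aspec_eq_bspec connector words ""
  show ((words.foldl (parse_ors_step connector) ("", [], false, [])).2.1,
        (words.foldl (parse_ors_step connector) ("", [], false, [])).2.2.2)
      = (List.zip ("" :: words) (List.zip words (words.tail.map Option.some ++ [none]))).foldl
          (parse_ors_alt_step connector) ([], [])
  rw [zip_eq_triples, hb, ha.1, ha.2, hab.1]
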